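-- pv_equiv track=rewrite | github.com/easyoung-lee/Algoithm_16 | week01_08_17/PRG_다음큰숫자_정준호.py | solution
-- ===== SOURCE A (Python) =====
-- def solution(n):
--     answer = 0
--     x = list(map(int, list(str(bin(n))[2:])))
--
--     if sum(x[:sum(x)]) == sum(x) :
--         x.insert(1, 0)
--         count = sum(x[2:])
--         for j in range(-1, -len(x[1:]), -1):
--             x[j] = 0
--         for j in range(-1, -count-1, -1):
--             x[j] = 1
--     else :
--         for i in range(-2, -len(x)-1, -1):   # -2번부터 처음까지
--             if x[i] < x[i+1]:   # ~~01~~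
--                 x[i], x[i+1] = x[i+1], x[i]
--                 count = sum(x[i:])
--                 for j in range(-1, -len(x[i:]), -1):
--                     x[j] = 0
--                 for j in range(-1, -count, -1):
--                     x[j] = 1
--                 break
--
--     y = "0b" + "".join(map(str, x))
--     return int(y, 2)
-- ===== SOURCE B (Python) =====
-- def solution(n):
--     if n == 0:
--         return 0
--     m = n
--     z = 0
--     while m & 1 == 0:
--         m >>= 1
--         z += 1
--     o = 0
--     while m & 1 == 1:
--         m >>= 1
--         o += 1
--     return ((m + 1) << (z + o)) + (1 << (o - 1)) - 1
-- ===== Notes on version B (the rewrite author's own statement) =====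
-- stated objective: simpler
-- what changed: A builds the list of binary digits of n with str(bin(n)), scans and rewrites it with three negative-index loops and re-parses it with int(.,2); B never materialises digits: it strips the trailing zeros and then the trailing ones of n with two shift loops and returns the answer by one closed-form shift/add expression ((m+1) << (z+o)) + (1 << (o-1)) - 1.
import Mathlib
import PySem

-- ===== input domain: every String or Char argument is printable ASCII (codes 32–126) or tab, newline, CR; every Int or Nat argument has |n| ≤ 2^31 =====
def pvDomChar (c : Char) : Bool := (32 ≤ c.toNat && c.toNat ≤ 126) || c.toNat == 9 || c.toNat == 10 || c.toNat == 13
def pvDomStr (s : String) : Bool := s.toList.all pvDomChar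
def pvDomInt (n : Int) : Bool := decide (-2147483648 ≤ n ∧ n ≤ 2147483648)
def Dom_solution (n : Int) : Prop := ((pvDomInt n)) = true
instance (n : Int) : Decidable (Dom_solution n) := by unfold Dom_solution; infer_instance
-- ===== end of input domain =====

-- B replaces A's digit-list surgery (build bin(n) digits, sweep with negative-index loops) by stripping
-- trailing zeros and ones of n arithmetically and one closed-form shift expression (objective: simpler).

-- ===== PORT A =====
-- hand port of `list(map(int, list(str(bin(n))[2:])))` for n ≥ 0 (exact there; Pre_ excludes n < 0,
-- where Python raises ValueError on the 'b' of '-0b…'): MSB-first binary digits, bin(0) giving [0].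
def bdAux : Nat → List Int
  | 0 => []
  | (m+1) => bdAux ((m+1)/2) ++ [(((m+1) % 2 : Nat) : Int)]
decreasing_by exact Nat.div_lt_self (Nat.succ_pos m) (by omega)

def binDigits (n : Int) : List Int := if n = 0 then [0] else bdAux n.toNat

-- hand port of `int("0b" + "".join(map(str, x)), 2)` for a 0/1 digit list (exact there)
def bitsVal (x : List Int) : Int := x.foldl (fun a b => 2*a + b) 0

-- the `for i in range(-2, -len(x)-1, -1): … break` search loop of A's else-branch
def searchLoop (x : List Int) : List Int → List Int
  | [] => x
  | i :: rest =>
    if PySem.List.pyGetD x i 0 < PySem.List.pyGetD x (i+1) 0 then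
      -- x[i], x[i+1] = x[i+1], x[i]
      let a := PySem.List.pyGetD x i 0
      let b := PySem.List.pyGetD x (i+1) 0
      let x2 := PySem.List.pySetD (PySem.List.pySetD x i b) (i+1) a
      let count := (PySem.List.slice x2 (some i) none).sum
      let x3 := (PySem.List.pyRange (-1) (-((PySem.List.slice x2 (some i) none).length : Int)) (-1)).foldl
                  (fun acc j => PySem.List.pySetD acc j 0) x2
      (PySem.List.pyRange (-1) (-count) (-1)).foldl (fun acc j => PySem.List.pySetD acc j 1) x3
    else searchLoop x rest

def solution (n : Int) : Int :=
  let x := binDigits n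
  if (PySem.List.slice x none (some x.sum)).sum = x.sum then
    let x1 := PySem.List.insert x 1 0
    let count := (PySem.List.slice x1 (some 2) none).sum
    let x2 := (PySem.List.pyRange (-1) (-((PySem.List.slice x1 (some 1) none).length : Int)) (-1)).foldl
                (fun acc j => PySem.List.pySetD acc j 0) x1
    let x3 := (PySem.List.pyRange (-1) (-count-1) (-1)).foldl (fun acc j => PySem.List.pySetD acc j 1) x2
    bitsVal x3
  else
    bitsVal (searchLoop x (PySem.List.pyRange (-2) (-(x.length : Int)-1) (-1)))

-- ===== PORT B =====
-- `while m & 1 == 0: m >>= 1; z += 1`  (entered only with m ≠ 0, where it terminates; base case 0 is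
-- the recursion's termination artifact and is never reached from solution_alt's n ≠ 0 branch)
def stripZeros : Nat → Nat × Nat
  | 0 => (0, 0)
  | (m+1) =>
    if (m+1) % 2 = 0 then
      let p := stripZeros ((m+1)/2)
      (p.1 + 1, p.2)
    else (0, m+1)
decreasing_by exact Nat.div_lt_self (Nat.succ_pos m) (by omega)

-- `while m & 1 == 1: m >>= 1; o += 1`
def stripOnes (m : Nat) : Nat × Nat :=
  if m % 2 = 1 then
    let p := stripOnes (m/2)
    (p.1 + 1, p.2)
  else (0, m)
decreasing_by exact Nat.div_lt_self (by omega) (by omega)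

def solution_alt (n : Int) : Int :=
  if n = 0 then 0
  else
    let p := stripZeros n.toNat   -- n.toNat exact for n ≥ 0 (Pre_)
    let q := stripOnes p.2
    (((q.2 + 1) <<< (p.1 + q.1) + (1 <<< (q.1 - 1)) - 1 : Nat) : Int)

-- ===== PRECONDITION & SPEC =====
-- Pre_ excludes exactly n < 0, where A raises ValueError (bin(-k) = '-0b…', int('b') fails).
def Pre_solution (n : Int) : Prop := 0 ≤ n
instance (n : Int) : Decidable (Pre_solution n) := by unfold Pre_solution; infer_instance
def pvWitness_solution : Int := 6

def Spec_solution (n : Int) (out : Int) : Prop := out = solution_alt n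
instance (n : Int) (out : Int) : Decidable (Spec_solution n out) := by unfold Spec_solution; infer_instance

-- ===== CLAIM (what is proved, stated in full; the proofs are below) =====
def Claim_equal_solution : Prop := ∀ (n : Int), Dom_solution n → Pre_solution n → Spec_solution n (solution n)

-- ===== LEMMAS AND PROOFS =====

-- ---- generic list/value lemmas ----

theorem bitsVal_foldl (xs : List Int) (a : Int) :
    xs.foldl (fun a b => 2*a + b) a = a * 2 ^ xs.length + bitsVal xs := by
  induction xs generalizing a with
  | nil => simp [bitsVal]
  | cons y ys ih =>
    simp only [List.foldl_cons, List.length_cons, bitsVal]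
    rw [ih (2*a + y), ih (2*0 + y)]
    ring

theorem bitsVal_append (xs ys : List Int) :
    bitsVal (xs ++ ys) = bitsVal xs * 2 ^ ys.length + bitsVal ys := by
  unfold bitsVal
  rw [List.foldl_append, bitsVal_foldl]
  rfl

theorem bitsVal_replicate_zero (k : Nat) : bitsVal (List.replicate k 0) = 0 := by
  induction k with
  | zero => rfl
  | succ k ih =>
    rw [List.replicate_succ]
    show (List.replicate k (0:Int)).foldl _ (2*0+0) = 0
    rw [bitsVal_foldl]
    simpa using ih

theorem bitsVal_replicate_one (k : Nat) : bitsVal (List.replicate k 1) = 2 ^ k - 1 := by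
  induction k with
  | zero => rfl
  | succ k ih =>
    rw [List.replicate_succ]
    show (List.replicate k (1:Int)).foldl _ (2*0+1) = _
    rw [bitsVal_foldl, ih]
    simp [List.length_replicate]
    ring

-- ---- bdAux: binary digits ----

theorem bdAux_pos (m : Nat) (h : 0 < m) : bdAux m = bdAux (m/2) ++ [((m % 2 : Nat) : Int)] := by
  cases m with
  | zero => omega
  | succ k => rw [bdAux]

theorem bitsVal_bdAux (m : Nat) : bitsVal (bdAux m) = m := by
  induction m using Nat.strong_induction_on with
  | _ m ih =>
    cases m with
    | zero => simp [bdAux, bitsVal]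
    | succ k =>
      rw [bdAux, bitsVal_append]
      rw [ih ((k+1)/2) (Nat.div_lt_self (Nat.succ_pos k) (by omega))]
      simp only [bitsVal, List.foldl_cons, List.foldl_nil, List.length_cons, List.length_nil]
      push_cast
      omega

theorem bdAux_mem (m : Nat) : ∀ y ∈ bdAux m, y = 0 ∨ y = 1 := by
  induction m using Nat.strong_induction_on with
  | _ m ih =>
    cases m with
    | zero => simp [bdAux]
    | succ k =>
      rw [bdAux]
      intro y hy
      rcases List.mem_append.mp hy with h | h
      · exact ih ((k+1)/2) (Nat.div_lt_self (Nat.succ_pos k) (by omega)) y h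
      · simp at h
        subst h
        omega

theorem bdAux_mul_pow2 (z m : Nat) (hm : 0 < m) :
    bdAux (m * 2 ^ z) = bdAux m ++ List.replicate z 0 := by
  induction z with
  | zero => simp
  | succ z ih =>
    have h1 : m * 2 ^ (z+1) = (m * 2 ^ z) * 2 := by ring
    have h2 : 0 < m * 2 ^ z := by positivity
    rw [h1, bdAux_pos _ (by omega)]
    have h3 : m * 2 ^ z * 2 / 2 = m * 2 ^ z := by omega
    have h4 : m * 2 ^ z * 2 % 2 = 0 := by omega
    rw [h3, h4, ih, List.replicate_succ']
    simp

theorem bdAux_ones (o m : Nat) :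
    bdAux (m * 2 ^ o + (2 ^ o - 1)) = bdAux m ++ List.replicate o 1 := by
  induction o with
  | zero => simp
  | succ o ih =>
    have hp : 0 < 2 ^ o := Nat.two_pow_pos _
    have h1 : m * 2 ^ (o+1) + (2 ^ (o+1) - 1) = (m * 2 ^ o + (2 ^ o - 1)) * 2 + 1 := by
      rw [pow_succ]
      have hr : m * (2 ^ o * 2) = (m * 2 ^ o) * 2 := by ring
      omega
    rw [h1, bdAux_pos _ (by omega)]
    have h2 : ((m * 2 ^ o + (2 ^ o - 1)) * 2 + 1) / 2 = m * 2 ^ o + (2 ^ o - 1) := by omega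
    have h3 : ((m * 2 ^ o + (2 ^ o - 1)) * 2 + 1) % 2 = 1 := by omega
    rw [h2, h3, ih, List.replicate_succ']
    simp

-- ---- strip loops of B ----

theorem stripZeros_spec (m : Nat) (h : 0 < m) :
    m = (stripZeros m).2 * 2 ^ (stripZeros m).1 ∧ (stripZeros m).2 % 2 = 1 := by
  induction m using Nat.strong_induction_on with
  | _ m ih =>
    cases m with
    | zero => omega
    | succ k =>
      rw [stripZeros]
      by_cases he : (k+1) % 2 = 0
      · simp only [he, if_true]
        have hlt : (k+1)/2 < k+1 := Nat.div_lt_self (Nat.succ_pos k) (by omega)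
        have hpos : 0 < (k+1)/2 := by omega
        obtain ⟨h1, h2⟩ := ih _ hlt hpos
        refine ⟨?_, h2⟩
        simp only [pow_succ]
        have hr : (stripZeros ((k+1)/2)).2 * ((2:Nat) ^ (stripZeros ((k+1)/2)).1 * 2)
            = ((stripZeros ((k+1)/2)).2 * 2 ^ (stripZeros ((k+1)/2)).1) * 2 := by ring
        omega
      · simp only [he, if_false]
        simpa using by omega

theorem stripOnes_spec (m : Nat) :
    m = (stripOnes m).2 * 2 ^ (stripOnes m).1 + (2 ^ (stripOnes m).1 - 1) ∧
      (stripOnes m).2 % 2 = 0 := by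
  induction m using Nat.strong_induction_on with
  | _ m ih =>
    rw [stripOnes]
    by_cases he : m % 2 = 1
    · simp only [he, if_true]
      have hlt : m / 2 < m := Nat.div_lt_self (by omega) (by omega)
      obtain ⟨h1, h2⟩ := ih _ hlt
      refine ⟨?_, h2⟩
      simp only [pow_succ]
      have hp : 0 < 2 ^ (stripOnes (m/2)).1 := Nat.two_pow_pos _
      have hr : (stripOnes (m/2)).2 * ((2:Nat) ^ (stripOnes (m/2)).1 * 2)
          = ((stripOnes (m/2)).2 * 2 ^ (stripOnes (m/2)).1) * 2 := by ring
      omega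
    · simp only [he, if_false]
      simpa using by omega

theorem stripOnes_pos (m : Nat) (h : m % 2 = 1) : 0 < (stripOnes m).1 := by
  rw [stripOnes]
  simp [h]

-- ---- pyRange with step -1 ----

theorem pyRange_neg_one (a b : Int) :
    PySem.List.pyRange a b (-1) = (List.range (a-b).toNat).map (fun k : Nat => a - (k:Int)) := by
  unfold PySem.List.pyRange
  rw [if_neg (by norm_num), if_neg (by norm_num)]
  by_cases h : b < a
  · rw [if_pos h]
    show List.map _ (List.range ((a - b + -(-1) - 1) / -(-1)).toNat) = _
    have : (a - b + -(-1) - 1) / -(-1) = a - b := by norm_num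
    rw [this]
    exact List.map_congr_left (fun k _ => by ring)
  · rw [if_neg h]
    have : (a - b).toNat = 0 := by omega
    show List.map _ (List.range 0) = _
    rw [this]
    rfl

-- pySetD with a negative index
theorem pySetD_neg (xs : List Int) (k : Nat) (v : Int) (h1 : 0 < k) (h2 : k ≤ xs.length) :
    PySem.List.pySetD xs (-(k:Int)) v = xs.set (xs.length - k) v := by
  unfold PySem.List.pySetD PySem.List.pySet? PySem.List.pyIdx?
  have hk : ¬ (0:Int) ≤ -(k:Int) := by omega
  have hk2 : -(xs.length:Int) ≤ -(k:Int) := by omega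
  have hk0 : k ≠ 0 := by omega
  simp [hk2, hk0]

theorem setLastAux (c : Int) (k : Nat) (xs : List Int) (h : k < xs.length) :
    (List.map (fun j : Nat => -1 - (j:Int)) (List.range k)).foldl
        (fun acc j => PySem.List.pySetD acc j c) xs
      = xs.take (xs.length - k) ++ List.replicate k c := by
  induction k with
  | zero => simp
  | succ k ih =>
    rw [List.range_succ, List.map_append, List.foldl_append, ih (by omega)]
    simp only [List.map_cons, List.map_nil, List.foldl_cons, List.foldl_nil]
    have hlen : (xs.take (xs.length - k) ++ List.replicate k c).length = xs.length := by
      simp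
      omega
    have he : (-1 - (k:Int)) = -(((k+1 : Nat)):Int) := by push_cast; ring
    rw [he, pySetD_neg _ _ _ (by omega) (by rw [hlen]; omega), hlen]
    rw [List.set_append]
    have hl1 : (xs.take (xs.length - k)).length = xs.length - k := by simp
    rw [if_pos (by rw [hl1]; omega)]
    rw [List.set_eq_take_append_cons_drop, if_pos (by rw [hl1]; omega)]
    rw [List.take_take, List.drop_take]
    have h2 : xs.length - (k+1) + 1 = xs.length - k := by omega
    have h3 : min (xs.length - (k+1)) (xs.length - k) = xs.length - (k+1) := by omega
    rw [h2, h3]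
    simp [List.replicate_succ]

-- the loop `for j in range(-1, -1-k, -1): x[j] = c` sets the last k entries to c
theorem setLast (c : Int) (k : Nat) (xs : List Int) (h : k < xs.length) :
    (PySem.List.pyRange (-1) (-1-(k:Int)) (-1)).foldl (fun acc j => PySem.List.pySetD acc j c) xs
      = xs.take (xs.length - k) ++ List.replicate k c := by
  rw [pyRange_neg_one]
  have hk : ((-1:Int) - (-1 - (k:Int))).toNat = k := by omega
  rw [hk]
  exact setLastAux c k xs h

-- ---- 0/1-list sum facts ----

theorem sum01_le_len (l : List Int) (h : ∀ y ∈ l, y = 0 ∨ y = 1) : l.sum ≤ (l.length : Int) := by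
  induction l with
  | nil => simp
  | cons y ys ih =>
    simp only [List.sum_cons, List.length_cons]
    have := h y (by simp)
    have := ih (fun z hz => h z (by simp [hz]))
    push_cast
    omega

theorem sum01_nonneg (l : List Int) (h : ∀ y ∈ l, y = 0 ∨ y = 1) : 0 ≤ l.sum := by
  induction l with
  | nil => simp
  | cons y ys ih =>
    simp only [List.sum_cons]
    have := h y (by simp)
    have := ih (fun z hz => h z (by simp [hz]))
    omega

theorem sum01_eq_len_all_one (l : List Int) (h : ∀ y ∈ l, y = 0 ∨ y = 1)
    (he : l.sum = (l.length : Int)) : ∀ y ∈ l, y = 1 := by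
  induction l with
  | nil => simp
  | cons y ys ih =>
    simp only [List.sum_cons, List.length_cons] at he
    have hy := h y (by simp)
    have h1 := sum01_le_len ys (fun z hz => h z (by simp [hz]))
    have h2 : y = 1 ∧ ys.sum = (ys.length : Int) := by
      push_cast at he ⊢
      omega
    intro z hz
    rcases List.mem_cons.mp hz with rfl | hz
    · exact h2.1
    · exact ih (fun w hw => h w (by simp [hw])) h2.2 z hz

-- ---- `x.insert(1, 0)` on a nonempty list ----
theorem insert_one (a v : Int) (l : List Int) : PySem.List.insert (a::l) 1 v = a :: v :: l := by
  unfold PySem.List.insert PySem.List.sliceIndices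
  norm_num

-- ---- search-loop lemmas ----
theorem searchLoop_skip (x : List Int) (i : Int) (rest : List Int)
    (h : ¬ PySem.List.pyGetD x i 0 < PySem.List.pyGetD x (i+1) 0) :
    searchLoop x (i::rest) = searchLoop x rest := by
  rw [searchLoop, if_neg h]

theorem searchLoop_append (x l1 l2 : List Int)
    (h : ∀ i ∈ l1, ¬ PySem.List.pyGetD x i 0 < PySem.List.pyGetD x (i+1) 0) :
    searchLoop x (l1 ++ l2) = searchLoop x l2 := by
  induction l1 with
  | nil => rfl
  | cons i t ih =>
    rw [List.cons_append, searchLoop_skip x i _ (h i (by simp)),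
        ih (fun j hj => h j (by simp [hj]))]

-- ---- reading x = P ++ 1^o ++ 0^z from the right ----
theorem getE_zero (P : List Int) (o z t : Nat) (h1 : 1 ≤ t) (h2 : t ≤ z) :
    PySem.List.pyGetD (P ++ List.replicate o 1 ++ List.replicate z 0) (-(t:Int)) 0 = 0 := by
  have hlen : (P ++ List.replicate o 1 ++ List.replicate z 0).length = P.length + o + z := by
    simp
    omega
  rw [PySem.List.pyGetD_neg_natCast _ t _ (by omega) (by rw [hlen]; omega)]
  rw [List.getElem_eq_iff, hlen]
  rw [List.getElem?_append_right (by simp; omega)]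
  simp [List.getElem?_replicate]
  omega

theorem getE_one (P : List Int) (o z t : Nat) (h1 : z+1 ≤ t) (h2 : t ≤ z+o) :
    PySem.List.pyGetD (P ++ List.replicate o 1 ++ List.replicate z 0) (-(t:Int)) 0 = 1 := by
  have hlen : (P ++ List.replicate o 1 ++ List.replicate z 0).length = P.length + o + z := by
    simp
    omega
  rw [PySem.List.pyGetD_neg_natCast _ t _ (by omega) (by rw [hlen]; omega)]
  rw [List.getElem_eq_iff, hlen]
  rw [List.getElem?_append_left (by simp; omega)]
  rw [List.getElem?_append_right (by omega)]
  simp [List.getElem?_replicate]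
  omega

theorem getE_P (Q : List Int) (o z : Nat) :
    PySem.List.pyGetD ((Q ++ [0]) ++ List.replicate o 1 ++ List.replicate z 0)
      (-((z+o+1:Nat):Int)) 0 = 0 := by
  have hlen : ((Q ++ [(0:Int)]) ++ List.replicate o 1 ++ List.replicate z 0).length
      = Q.length + 1 + o + z := by
    simp
    omega
  rw [PySem.List.pyGetD_neg_natCast _ (z+o+1) _ (by omega) (by rw [hlen]; omega)]
  rw [List.getElem_eq_iff, hlen]
  have he : Q.length + 1 + o + z - (z+o+1) = Q.length := by omega
  rw [he]
  rw [List.getElem?_append_left (by simp)]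
  rw [List.getElem?_append_left (by simp)]
  rw [List.getElem?_append_right (by omega)]
  simp

-- ---- evaluating A in the two shapes of the digit list ----

-- n = 1^(o+1) 0^z in binary: A takes its then-branch
theorem A_case1 (n : Int) (o z : Nat)
    (hx : binDigits n = List.replicate (o+1) 1 ++ List.replicate z 0) :
    solution n = 2^(z+o+1) + 2^o - 1 := by
  unfold solution
  rw [hx]
  dsimp only
  have hsum : (List.replicate (o+1) (1:Int) ++ List.replicate z 0).sum = ((o+1:Nat):Int) := by
    simp
  rw [hsum]
  have hcond : (PySem.List.slice (List.replicate (o+1) 1 ++ List.replicate z 0) none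
      (some ((o+1:Nat):Int))).sum = ((o+1:Nat):Int) := by
    rw [PySem.List.slice_to _ (by positivity), Int.toNat_natCast,
        List.take_left' (by simp)]
    simp
  rw [if_pos hcond]
  -- x.insert(1, 0)
  rw [List.replicate_succ, List.cons_append, insert_one]
  -- len(x[1:]) and count = sum(x[2:]) = o
  rw [PySem.List.slice_from _ (by norm_num)]
  norm_num [List.drop_succ_cons]
  rw [PySem.List.slice_from _ (by norm_num)]
  simp only [show Int.toNat 2 = 2 from rfl, List.drop_succ_cons, List.drop_zero]
  have hcount : (List.replicate o (1:Int) ++ List.replicate z 0).sum = ((o:Nat):Int) := by simp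
  rw [hcount]
  -- first loop: sets the last z+o entries to 0
  have hr1 : (-1 + (-(z:Int) + -(o:Int))) = -1 - ((z+o:Nat):Int) := by push_cast; ring
  rw [hr1, setLast 0 (z+o) _ (by simp; omega)]
  have ht1 : (1 :: 0 :: (List.replicate o (1:Int) ++ List.replicate z 0)).length - (z+o) = 2 := by
    simp
    omega
  rw [ht1]
  -- second loop: sets the last o entries to 1
  have hr2 : (-((o:Nat):Int) - 1) = -1 - ((o:Nat):Int) := by ring
  rw [hr2, setLast 1 o _ (by simp; omega)]
  simp only [List.take_succ_cons, List.take_zero, List.length_append, List.length_cons,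
    List.length_nil, List.length_replicate]
  rw [show 0 + 1 + 1 + (z + o) - o = z + 2 by omega, List.take_append]
  rw [List.take_of_length_le (by simp), List.take_replicate]
  rw [show z + 2 - ([1, (0:Int)]).length = z by simp, show min z (z+o) = z by omega]
  rw [bitsVal_append, bitsVal_append, bitsVal_replicate_zero, bitsVal_replicate_one]
  simp only [List.length_replicate]
  rw [show z + o + 1 = 1 + z + o by omega, pow_add, pow_add]
  norm_num [bitsVal]
  ring

-- with a 0 inside the digit list, the first `sum(x[:sum(x)]) == sum(x)` test of A fails
theorem condA_false (Q : List Int) (o z : Nat) (hQ : ∀ y ∈ Q ++ [(0:Int)], y = 0 ∨ y = 1) :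
    ¬ ((PySem.List.slice ((Q ++ [0]) ++ List.replicate (o+1) 1 ++ List.replicate z 0) none
        (some ((Q ++ [0]) ++ List.replicate (o+1) 1 ++ List.replicate z 0).sum)).sum
      = ((Q ++ [0]) ++ List.replicate (o+1) 1 ++ List.replicate z 0).sum) := by
  intro h
  set x := (Q ++ [0]) ++ List.replicate (o+1) 1 ++ List.replicate z 0 with hxdef
  have hx01 : ∀ y ∈ x, y = 0 ∨ y = 1 := by
    intro y hy
    rw [hxdef] at hy
    rcases List.mem_append.mp hy with hy | hy
    · rcases List.mem_append.mp hy with hy | hy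
      · exact hQ y hy
      · right
        exact List.eq_of_mem_replicate hy
    · left
      exact List.eq_of_mem_replicate hy
  have hsP : 0 ≤ (Q ++ [(0:Int)]).sum := sum01_nonneg _ hQ
  have hs : x.sum = (Q ++ [(0:Int)]).sum + ((o+1:Nat):Int) := by
    rw [hxdef]
    simp
  have hspos : 0 ≤ x.sum := by omega
  rw [PySem.List.slice_to _ hspos] at h
  have ht : ((x.sum.toNat : Nat) : Int) = x.sum := Int.toNat_of_nonneg hspos
  set t := x.sum.toNat with htdef
  have hxlen : x.length = Q.length + 1 + (o+1) + z := by rw [hxdef]; simp; omega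
  by_cases hle : t ≤ x.length
  · have hlen : (x.take t).length = t := by rw [List.length_take]; omega
    have hall : ∀ y ∈ x.take t, y = 1 :=
      sum01_eq_len_all_one _ (fun y hy => hx01 y (List.mem_of_mem_take hy))
        (by rw [hlen, ht]; exact h)
    by_cases hQt : Q.length + 1 ≤ t
    · -- the 0 written after Q lies inside the take: contradiction with all-ones
      have hQl : Q.length < (x.take t).length := by omega
      have h0 : (x.take t)[Q.length]'hQl = 0 := by
        rw [List.getElem_take, List.getElem_eq_iff, hxdef]
        rw [List.getElem?_append_left (by simp)]
        rw [List.getElem?_append_left (by simp)]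
        rw [List.getElem?_append_right (by omega)]
        simp
      have h1 := hall _ (List.getElem_mem hQl)
      rw [h0] at h1
      exact absurd h1 (by norm_num)
    · -- all of the take lies inside Q ++ [0]: its ones cannot account for the o+1 ones
      have htake : x.take t = (Q ++ [0]).take t := by
        rw [hxdef, List.take_append_of_le_length (by simp; omega),
            List.take_append_of_le_length (by simp; omega)]
      have hsum_take : ((Q ++ [(0:Int)]).take t).sum = x.sum := by rw [← htake]; exact h
      have hdrop : 0 ≤ ((Q ++ [(0:Int)]).drop t).sum :=
        sum01_nonneg _ (fun y hy => hQ y (List.mem_of_mem_drop hy))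
      have hsplit := List.sum_take_add_sum_drop (Q ++ [(0:Int)]) t
      have hlt : ((Q ++ [(0:Int)]).take t).length = t := by simp; omega
      have hlen_take : ((Q ++ [(0:Int)]).take t).sum ≤ (t:Int) := by
        have := sum01_le_len ((Q ++ [(0:Int)]).take t)
          (fun y hy => hQ y (List.mem_of_mem_take hy))
        rwa [hlt] at this
      omega
  · -- sum(x) exceeds the length of x: impossible for a 0/1 list
    have := sum01_le_len x hx01
    omega

-- the swap x[i], x[i+1]: writing 1 over the 0 that follows Q
theorem setQ0 (Q : List Int) (o z : Nat) :
    ((Q ++ [0]) ++ List.replicate o 1 ++ List.replicate z 0).set Q.length 1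
      = (Q ++ [1]) ++ List.replicate o 1 ++ List.replicate z 0 := by
  rw [List.set_append, if_pos (by simp)]
  rw [List.set_append, if_pos (by simp)]
  rw [List.set_append, if_neg (by simp)]
  simp

-- …and 0 over the first of the following ones
theorem setOnes0 (Q' : List Int) (o z : Nat) :
    (Q' ++ List.replicate (o+1) 1 ++ List.replicate z 0).set Q'.length 0
      = (Q' ++ (0 :: List.replicate o 1)) ++ List.replicate z 0 := by
  rw [List.set_append, if_pos (by simp)]
  rw [List.set_append, if_neg (by simp)]
  simp [List.replicate_succ]

theorem drop_head (Q' : List Int) (a : Int) (l : List Int) :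
    List.drop Q'.length ((Q' ++ [a]) ++ l) = a :: l := by
  rw [List.append_assoc, List.drop_left' rfl]
  rfl

-- n = (Q 0 1^(o+1) 0^z) in binary (Q the digits of a positive even number's half):
-- A takes its else-branch and the search loop fires where the swap produces Q 1 0 1^o 0^z
theorem A_case2 (n : Int) (Q : List Int) (o z : Nat)
    (hQ : ∀ y ∈ Q ++ [(0:Int)], y = 0 ∨ y = 1)
    (hx : binDigits n = (Q ++ [0]) ++ List.replicate (o+1) 1 ++ List.replicate z 0) :
    solution n = (bitsVal Q * 2 + 1) * 2^(z+o+1) + (2^o - 1) := by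
  unfold solution
  rw [hx]
  dsimp only
  rw [if_neg (condA_false Q o z hQ)]
  have hxlen : ((Q ++ [(0:Int)]) ++ List.replicate (o+1) 1 ++ List.replicate z 0).length
      = Q.length + o + z + 2 := by simp; omega
  rw [pyRange_neg_one, hxlen]
  have hc : ((-2:Int) - (-((Q.length + o + z + 2 : Nat):Int) - 1)).toNat
      = (z + o) + (Q.length + 1) := by push_cast; omega
  rw [hc, List.range_add, List.map_append]
  -- skip the indices lying over the 1^(o+1) 0^z tail
  rw [searchLoop_append _ _ _ ?skip]
  case skip =>
    intro i hi
    simp only [List.mem_map, List.mem_range] at hi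
    obtain ⟨k, hk, rfl⟩ := hi
    have he1 : (-2 - (k:Int)) = -((k+2:Nat):Int) := by push_cast; ring
    have he2 : (-((k+2:Nat):Int)) + 1 = -((k+1:Nat):Int) := by push_cast; ring
    by_cases hkz : k + 2 ≤ z
    · rw [he1, he2, getE_zero _ _ _ _ (by omega) (by omega),
          getE_zero _ _ _ _ (by omega) (by omega)]
      omega
    · rw [he1, he2, getE_one (Q ++ [0]) (o+1) z (k+2) (by omega) (by omega)]
      by_cases hkz1 : k + 1 ≤ z
      · rw [getE_zero _ _ _ _ (by omega) (by omega)]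
        omega
      · rw [getE_one (Q ++ [0]) (o+1) z (k+1) (by omega) (by omega)]
        omega
  -- the loop fires at i = -(z+o+2)
  rw [List.range_succ_eq_map, List.map_cons, List.map_cons]
  have hi0 : ((-2:Int) - ((z + o + 0 : Nat):Int)) = -((z+(o+1)+1:Nat):Int) := by push_cast; ring
  have hg0 : PySem.List.pyGetD ((Q ++ [0]) ++ List.replicate (o+1) 1 ++ List.replicate z 0)
      (-((z+(o+1)+1:Nat):Int)) 0 = 0 := getE_P Q (o+1) z
  have hg1 : PySem.List.pyGetD ((Q ++ [0]) ++ List.replicate (o+1) 1 ++ List.replicate z 0)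
      (-((z+(o+1)+1:Nat):Int) + 1) 0 = 1 := by
    have he : (-((z+(o+1)+1:Nat):Int) + 1) = -((z+o+1:Nat):Int) := by push_cast; ring
    rw [he]
    exact getE_one (Q ++ [0]) (o+1) z (z+o+1) (by omega) (by omega)
  rw [searchLoop, hi0, if_pos (by rw [hg0, hg1]; norm_num)]
  dsimp only
  rw [hg0, hg1]
  -- the swap: x[i] = 1, x[i+1] = 0
  rw [pySetD_neg _ (z+(o+1)+1) 1 (by omega) (by rw [hxlen]; omega), hxlen]
  rw [show Q.length + o + z + 2 - (z+(o+1)+1) = Q.length by omega, setQ0]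
  have he : (-((z+(o+1)+1:Nat):Int) + 1) = -((z+o+1:Nat):Int) := by push_cast; ring
  rw [he]
  have hxlen1 : ((Q ++ [(1:Int)]) ++ List.replicate (o+1) 1 ++ List.replicate z 0).length
      = Q.length + o + z + 2 := by simp; omega
  rw [pySetD_neg _ (z+o+1) 0 (by omega) (by rw [hxlen1]; omega), hxlen1]
  rw [show Q.length + o + z + 2 - (z+o+1) = (Q ++ [(1:Int)]).length by
    simp only [List.length_append, List.length_cons, List.length_nil]
    omega]
  rw [setOnes0]
  -- x[i:] after the swap
  rw [PySem.List.slice_from_neg_natCast _ (z+(o+1)+1) (by omega)]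
  have hxlen2 : (((Q ++ [(1:Int)]) ++ (0 :: List.replicate o 1)) ++ List.replicate z 0).length
      = Q.length + o + z + 2 := by simp; omega
  rw [hxlen2, show Q.length + o + z + 2 - (z+(o+1)+1) = Q.length by omega]
  rw [List.append_assoc (Q ++ [(1:Int)]), drop_head]
  have hrsum : ((1:Int) :: ((0 :: List.replicate o 1) ++ List.replicate z 0)).sum
      = ((o+1:Nat):Int) := by
    simp only [List.sum_cons, List.sum_append, List.sum_replicate]
    push_cast
    ring
  have hrlen : ((1:Int) :: ((0 :: List.replicate o 1) ++ List.replicate z 0)).length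
      = z + o + 2 := by simp; omega
  rw [hrsum, hrlen]
  -- first loop: zero out everything right of Q++[1]
  have hxlen2' : ((Q ++ [(1:Int)]) ++ ((0 :: List.replicate o 1) ++ List.replicate z 0)).length
      = Q.length + o + z + 2 := by simp; omega
  have hb1 : (-((z+o+2:Nat):Int)) = -1 - ((z+o+1:Nat):Int) := by push_cast; ring
  rw [hb1, setLast 0 (z+o+1) _ (by rw [hxlen2']; omega), hxlen2']
  rw [show Q.length + o + z + 2 - (z+o+1) = Q.length + 1 by omega]
  rw [List.take_left' (by simp)]
  -- second loop: o ones at the end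
  have hb2 : (-((o+1:Nat):Int)) = -1 - ((o:Nat):Int) := by push_cast; ring
  have hxlen3 : ((Q ++ [(1:Int)]) ++ List.replicate (z+o+1) 0).length = Q.length + z + o + 2 := by
    simp
    omega
  rw [hb2, setLast 1 o _ (by rw [hxlen3]; omega), hxlen3]
  rw [show Q.length + z + o + 2 - o = Q.length + 1 + (z+1) by omega]
  rw [List.take_append, List.take_of_length_le (by simp), List.take_replicate,
      show Q.length + 1 + (z+1) - ((Q ++ [(1:Int)]).length) = z + 1 by
        simp only [List.length_append, List.length_cons, List.length_nil]
        omega,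
      show min (z+1) (z+o+1) = z+1 by omega]
  -- final value
  rw [bitsVal_append, bitsVal_append, bitsVal_append, bitsVal_replicate_zero, bitsVal_replicate_one]
  simp only [List.length_replicate, List.length_cons, List.length_nil]
  norm_num [bitsVal]
  rw [show z + o + 1 = 1 + (z + o) by omega, pow_add, pow_add]
  ring

-- ---- main proof ----

theorem main_eq (n : Int) (hn : 0 < n) : solution n = solution_alt n := by
  have hne : n ≠ 0 := by omega
  have hNpos : 0 < n.toNat := by omega
  obtain ⟨hz1, hz2⟩ := stripZeros_spec n.toNat hNpos
  obtain ⟨ho1, ho2⟩ := stripOnes_spec (stripZeros n.toNat).2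
  have hopos : 0 < (stripOnes (stripZeros n.toNat).2).1 :=
    stripOnes_pos _ hz2
  set z := (stripZeros n.toNat).1 with hzdef
  set m1 := (stripZeros n.toNat).2 with hm1def
  set o1 := (stripOnes m1).1 with ho1def
  set m2 := (stripOnes m1).2 with hm2def
  obtain ⟨o, ho⟩ : ∃ o, o1 = o + 1 := ⟨o1 - 1, by omega⟩
  have h2o : 1 ≤ 2^o := Nat.one_le_two_pow
  -- the value of B
  have hB : solution_alt n = (((m2+1) * 2^(z+(o+1)) + (2^o - 1) : Nat) : Int) := by
    unfold solution_alt
    rw [if_neg hne]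
    dsimp only
    rw [← hzdef, ← hm1def, ← ho1def, ← hm2def, ho]
    rw [Nat.shiftLeft_eq, Nat.shiftLeft_eq]
    have ho' : o + 1 - 1 = o := by omega
    rw [ho', one_mul]
    omega
  -- the digit list of A
  have hm1pos : 0 < m1 := by omega
  have hbin : binDigits n = bdAux m2 ++ List.replicate (o+1) 1 ++ List.replicate z 0 := by
    unfold binDigits
    rw [if_neg hne]
    have : n.toNat = m1 * 2 ^ z := hz1
    rw [this, bdAux_mul_pow2 z m1 hm1pos]
    have : m1 = m2 * 2 ^ (o+1) + (2 ^ (o+1) - 1) := by rw [← ho]; exact ho1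
    rw [this, bdAux_ones]
  by_cases hm2 : m2 = 0
  · -- branch 1 of A: n = 1^(o+1) 0^z
    rw [A_case1 n o z (by rw [hbin, hm2]; simp only [bdAux, List.nil_append]), hB, hm2]
    push_cast [h2o]
    ring
  · -- branch 2 of A
    have hm2pos : 0 < m2 := by omega
    have hPQ : bdAux m2 = bdAux (m2/2) ++ [(0:Int)] := by
      rw [bdAux_pos m2 hm2pos, ho2]
      norm_num
    have hQ : ∀ y ∈ bdAux (m2/2) ++ [(0:Int)], y = 0 ∨ y = 1 := by
      rw [← hPQ]
      exact bdAux_mem m2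
    rw [A_case2 n (bdAux (m2/2)) o z hQ (by rw [hbin, hPQ]), hB, bitsVal_bdAux]
    have hhalf : (m2/2) * 2 = m2 := by omega
    have hc2 : ((m2/2 : Nat) : Int) * 2 + 1 = ((m2:Nat):Int) + 1 := by omega
    rw [hc2]
    push_cast [h2o]
    ring

-- ===== VERDICT (by name: the statement is the Claim_ definition above) =====
theorem solution_spec : Claim_equal_solution := by
  intro n _ hpre
  unfold Spec_solution
  rcases lt_or_eq_of_le hpre with h | h
  · exact main_eq n h
  · subst h
    decide
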